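-- pv_equiv track=rewrite | github.com/SavinovSergey/AlphaFuture_RAG | prepare_text.py | remove_common_prefixes
-- ===== SOURCE A (Python) =====
-- def remove_common_prefixes(strings):
--     """Удаляет общие префиксы из отсортированного списка строк."""
--
--     if not strings:
--         return []
--
--     result = []
--     prev = strings[0]
--     com_len = 0
--     for i, curr in enumerate(strings[1:]):
--         # Сохраняем у первого интента общий префикс
--         result.append(prev[com_len:])
--         # Находим длину общего префикса
--         max_com_len = min(len(prev), len(curr))
--         while com_len < max_com_len and prev[:com_len] == curr[:com_len]:
--             com_len += 1
--         # Уменьшаем длину общего префикса, пока не найдем новый общий префикс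
--         while com_len > 0 and prev[:com_len] != curr[:com_len]:
--             com_len -= 1
--         prev = curr
--
--     result.append(prev[com_len:])
--     return result
-- ===== SOURCE B (Python) =====
-- def remove_common_prefixes(strings):
--     """Strip from each string the common prefix it shares with its predecessor."""
--     if not strings:
--         return []
--     result = [strings[0]]
--     for prev, curr in zip(strings, strings[1:]):
--         i = 0
--         m = min(len(prev), len(curr))
--         while i < m and prev[i] == curr[i]:
--             i += 1
--         result.append(curr[i:])
--     return result
-- ===== Notes on version B (the rewrite author's own statement) =====
-- stated objective: simpler
-- what changed: B recomputes each adjacent pair's longest-common-prefix length independently with a single character scan over zip(strings, strings[1:]), eliminating A's com_len accumulator threaded across iterations and its increment-then-decrement correction loops over whole prefix slices.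
import Mathlib
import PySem

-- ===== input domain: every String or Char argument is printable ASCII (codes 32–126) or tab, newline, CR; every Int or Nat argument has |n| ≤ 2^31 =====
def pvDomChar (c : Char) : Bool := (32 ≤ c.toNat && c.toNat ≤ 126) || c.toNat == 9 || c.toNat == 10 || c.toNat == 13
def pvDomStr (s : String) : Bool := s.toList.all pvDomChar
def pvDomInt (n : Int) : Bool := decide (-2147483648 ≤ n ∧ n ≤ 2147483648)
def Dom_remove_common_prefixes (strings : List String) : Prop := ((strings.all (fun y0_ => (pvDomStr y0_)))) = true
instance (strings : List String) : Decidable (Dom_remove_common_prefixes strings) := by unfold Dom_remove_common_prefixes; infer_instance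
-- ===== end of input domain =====

-- B replaces A's cross-iteration com_len accumulator (with its two correction loops over
-- prefix slices) by an independent single-scan LCP computation per adjacent pair: simpler.

-- ===== PORT A =====
-- A's first while: increase com_len while prev[:com_len] == curr[:com_len] and com_len < max_com_len
def incLoop (p c : List Char) (mx : Nat) (l : Nat) : Nat :=
  if h : l < mx ∧ p.take l = c.take l then incLoop p c mx (l + 1) else l
termination_by mx - l
decreasing_by omega

-- A's second while: decrease com_len while prev[:com_len] != curr[:com_len] and com_len > 0
def decLoop (p c : List Char) (l : Nat) : Nat :=
  if h : 0 < l ∧ p.take l ≠ c.take l then decLoop p c (l - 1) else l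
termination_by l
decreasing_by omega

-- A's loop body over (result, prev, com_len)
def stepA (st : List String × List Char × Nat) (curr : String) : List String × List Char × Nat :=
  let result := st.1 ++ [String.ofList (st.2.1.drop st.2.2)]
  let mx := min st.2.1.length curr.toList.length
  let c1 := incLoop st.2.1 curr.toList mx st.2.2
  (result, curr.toList, decLoop st.2.1 curr.toList c1)

def remove_common_prefixes (strings : List String) : List String :=
  match strings with
  | [] => []
  | s0 :: rest =>
    let st := rest.foldl stepA ([], s0.toList, 0)
    st.1 ++ [String.ofList (st.2.1.drop st.2.2)]

-- ===== PORT B =====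
-- B's while: i = 0; while i < min(len(prev), len(curr)) and prev[i] == curr[i]: i += 1
def lcpLen (a b : List Char) (i : Nat) : Nat :=
  if h : i < min a.length b.length then
    if a[i]'(by omega) = b[i]'(by omega) then lcpLen a b (i + 1) else i
  else i
termination_by min a.length b.length - i
decreasing_by omega

def remove_common_prefixes_alt (strings : List String) : List String :=
  match strings with
  | [] => []
  | s0 :: _ =>
    s0 :: ((strings.zip (strings.drop 1)).map (fun pc =>
      String.ofList (pc.2.toList.drop (lcpLen pc.1.toList pc.2.toList 0))))

-- ===== PRECONDITION & SPEC =====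
def Spec_remove_common_prefixes (strings : List String) (out : List String) : Prop := out = remove_common_prefixes_alt strings
instance (strings : List String) (out : List String) : Decidable (Spec_remove_common_prefixes strings out) := by unfold Spec_remove_common_prefixes; infer_instance

-- ===== CLAIM (what is proved, stated in full; the proofs are below) =====
def Claim_equal_remove_common_prefixes : Prop := ∀ (strings : List String), Dom_remove_common_prefixes strings → Spec_remove_common_prefixes strings (remove_common_prefixes strings)

-- ===== LEMMAS AND PROOFS =====

-- length of the longest common prefix (the common spec of both loop mechanisms)
def lcpN : List Char → List Char → Nat
  | a :: as, b :: bs => if a = b then lcpN as bs + 1 else 0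
  | _, _ => 0

theorem lcpN_le (a b : List Char) : lcpN a b ≤ min a.length b.length := by
  induction a generalizing b with
  | nil => simp [lcpN]
  | cons x as ih =>
    cases b with
    | nil => simp [lcpN]
    | cons y bs =>
      simp only [lcpN]
      split
      · have := ih bs; simp [List.length_cons]; omega
      · omega

theorem take_eq_of_le_lcpN (a b : List Char) : ∀ l, l ≤ lcpN a b → a.take l = b.take l := by
  induction a generalizing b with
  | nil => intro l hl; simp [lcpN] at hl; simp [hl]
  | cons x as ih =>
    intro l hl
    cases b with
    | nil => simp [lcpN] at hl; simp [hl]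
    | cons y bs =>
      simp only [lcpN] at hl
      cases l with
      | zero => simp
      | succ m =>
        split at hl
        · next hxy => subst hxy; simp [List.take_succ_cons]; exact ih bs m (by omega)
        · omega

theorem take_ne_of_lt (a b : List Char) : ∀ l, lcpN a b < l → l ≤ a.length → a.take l ≠ b.take l := by
  induction a generalizing b with
  | nil => intro l h1 h2; simp at h2; omega
  | cons x as ih =>
    intro l h1 h2
    cases b with
    | nil =>
      cases l with
      | zero => simp [lcpN] at h1
      | succ m => simp
    | cons y bs =>
      simp only [lcpN] at h1
      cases l with
      | zero => omega
      | succ m =>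
        split at h1
        · next hxy =>
          subst hxy
          simp only [List.take_succ_cons, ne_eq, List.cons.injEq, true_and]
          exact ih bs m (by omega) (by simpa using h2)
        · next hxy => simp [List.take_succ_cons, hxy]

theorem get_eq_of_lt_lcpN (a b : List Char) : ∀ i, i < lcpN a b →
    ∀ (h1 : i < a.length) (h2 : i < b.length), a[i] = b[i] := by
  induction a generalizing b with
  | nil => intro i hi; simp [lcpN] at hi
  | cons x as ih =>
    intro i hi h1 h2
    cases b with
    | nil => simp [lcpN] at hi
    | cons y bs =>
      simp only [lcpN] at hi
      split at hi
      · next hxy =>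
        cases i with
        | zero => simpa using hxy
        | succ m => simpa using ih bs m (by omega) (by simpa using h1) (by simpa using h2)
      · omega

theorem get_ne_at_lcpN (a b : List Char) (h : lcpN a b < min a.length b.length) :
    ∀ (h1 : lcpN a b < a.length) (h2 : lcpN a b < b.length), a[lcpN a b] ≠ b[lcpN a b] := by
  induction a generalizing b with
  | nil => simp at h
  | cons x as ih =>
    cases b with
    | nil => simp at h
    | cons y bs =>
      intro h1 h2
      simp only [lcpN] at h ⊢
      split
      · next hxy =>
        subst hxy
        simp only [List.getElem_cons_succ, ne_eq]
        have h' : lcpN as bs < min as.length bs.length := by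
          simp at h ⊢; omega
        exact ih bs h' (by omega) (by omega)
      · next hxy => simpa using hxy

-- B's scan computes lcpN when started at any i ≤ lcpN
theorem lcpLen_eq_aux (k : Nat) : ∀ (a b : List Char) (i : Nat), lcpN a b - i ≤ k →
    i ≤ lcpN a b → lcpLen a b i = lcpN a b := by
  induction k with
  | zero =>
    intro a b i hk hi
    have hi' : i = lcpN a b := by omega
    subst hi'
    unfold lcpLen
    split
    · next h =>
      rw [if_neg]
      exact get_ne_at_lcpN a b h (by omega) (by omega)
    · rfl
  | succ k ih =>
    intro a b i hk hi
    rcases Nat.lt_or_ge i (lcpN a b) with hlt | hge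
    · have hmin : i < min a.length b.length := by have := lcpN_le a b; omega
      unfold lcpLen
      rw [dif_pos hmin, if_pos (get_eq_of_lt_lcpN a b i hlt (by omega) (by omega))]
      exact ih a b (i + 1) (by omega) (by omega)
    · have hi' : i = lcpN a b := by omega
      subst hi'
      unfold lcpLen
      split
      · next h =>
        rw [if_neg]
        exact get_ne_at_lcpN a b h (by omega) (by omega)
      · rfl

theorem lcpLen_zero (a b : List Char) : lcpLen a b 0 = lcpN a b :=
  lcpLen_eq_aux (lcpN a b) a b 0 (by omega) (Nat.zero_le _)

-- A's increment loop, started above the LCP (within bounds), stops at once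
theorem incLoop_of_gt (p c : List Char) (mx s : Nat) (h1 : lcpN p c < s) (h2 : s ≤ p.length) :
    incLoop p c mx s = s := by
  unfold incLoop
  rw [dif_neg]
  intro ⟨_, heq⟩
  exact take_ne_of_lt p c s h1 h2 heq

-- A's increment loop, started at or below the LCP, climbs to min mx (lcpN + 1)
theorem incLoop_of_le (p c : List Char) (s : Nat) (hs : s ≤ lcpN p c)
    (hmx : lcpN p c ≤ min p.length c.length) :
    incLoop p c (min p.length c.length) s = min (min p.length c.length) (lcpN p c + 1) := by
  have hk : ∀ k s, lcpN p c - s ≤ k → s ≤ lcpN p c →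
      incLoop p c (min p.length c.length) s = min (min p.length c.length) (lcpN p c + 1) := by
    intro k
    induction k with
    | zero =>
      intro s hk hs
      have hs' : s = lcpN p c := by omega
      subst hs'
      rcases Nat.lt_or_ge (lcpN p c) (min p.length c.length) with hlt | hge
      · unfold incLoop
        rw [dif_pos ⟨hlt, take_eq_of_le_lcpN p c _ le_rfl⟩]
        rw [incLoop_of_gt p c _ _ (by omega) (by omega)]
        omega
      · unfold incLoop
        rw [dif_neg (by omega)]
        omega
    | succ k ih =>
      intro s hk hs
      rcases Nat.lt_or_ge s (lcpN p c) with hlt | hge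
      · have hsm : s < min p.length c.length := by omega
        unfold incLoop
        rw [dif_pos ⟨hsm, take_eq_of_le_lcpN p c s (by omega)⟩]
        exact ih (s + 1) (by omega) (by omega)
      · have hs' : s = lcpN p c := by omega
        subst hs'
        rcases Nat.lt_or_ge (lcpN p c) (min p.length c.length) with hlt | hge'
        · unfold incLoop
          rw [dif_pos ⟨hlt, take_eq_of_le_lcpN p c _ le_rfl⟩]
          rw [incLoop_of_gt p c _ _ (by omega) (by omega)]
          omega
        · unfold incLoop
          rw [dif_neg (by omega)]
          omega
  exact hk (lcpN p c) s (by omega) hs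

-- A's decrement loop at the LCP is a no-op
theorem decLoop_at_lcpN (p c : List Char) : decLoop p c (lcpN p c) = lcpN p c := by
  unfold decLoop
  rw [dif_neg]
  intro ⟨_, hne⟩
  exact hne (take_eq_of_le_lcpN p c _ le_rfl)

-- A's decrement loop, started above the LCP (within bounds), descends exactly to the LCP
theorem decLoop_of_gt (p c : List Char) : ∀ s, lcpN p c < s → s ≤ p.length →
    decLoop p c s = lcpN p c := by
  intro s
  induction s with
  | zero => omega
  | succ m ih =>
    intro h1 h2
    unfold decLoop
    rw [dif_pos ⟨by omega, take_ne_of_lt p c (m + 1) h1 h2⟩]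
    simp only [Nat.add_sub_cancel]
    rcases Nat.lt_or_ge (lcpN p c) m with hlt | hge
    · exact ih hlt (by omega)
    · have : m = lcpN p c := by omega
      rw [this]
      exact decLoop_at_lcpN p c
-- A's net com_len update equals the LCP whenever the incoming com_len is within prev's length
theorem incdec_eq (p c : List Char) (s : Nat) (hs : s ≤ p.length) :
    decLoop p c (incLoop p c (min p.length c.length) s) = lcpN p c := by
  have hmx := lcpN_le p c
  rcases Nat.lt_or_ge (lcpN p c) s with hgt | hle
  case inr =>
    rw [incLoop_of_le p c s hle hmx]
    rcases Nat.lt_or_ge (lcpN p c) (min p.length c.length) with hlt | hge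
    · have : min (min p.length c.length) (lcpN p c + 1) = lcpN p c + 1 := by omega
      rw [this]
      exact decLoop_of_gt p c (lcpN p c + 1) (by omega) (by omega)
    · have : min (min p.length c.length) (lcpN p c + 1) = lcpN p c := by omega
      rw [this]
      exact decLoop_at_lcpN p c
  · rw [incLoop_of_gt p c _ s hgt hs]
    exact decLoop_of_gt p c s hgt hs

-- the stream of successor strings stripped of their LCP with their predecessor
def gB : List Char → List String → List String
  | _, [] => []
  | p, c :: cs => String.ofList (c.toList.drop (lcpN p c.toList)) :: gB c.toList cs

theorem foldA_eq (rest : List String) : ∀ (prev : List Char) (com_len : Nat) (acc : List String),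
    com_len ≤ prev.length →
    (let st := rest.foldl stepA (acc, prev, com_len)
     st.1 ++ [String.ofList (st.2.1.drop st.2.2)]) =
      acc ++ String.ofList (prev.drop com_len) :: gB prev rest := by
  induction rest with
  | nil => intro prev com_len acc h; simp [gB]
  | cons c cs ih =>
    intro prev com_len acc h
    simp only [List.foldl_cons]
    have hstep : stepA (acc, prev, com_len) c =
        (acc ++ [String.ofList (prev.drop com_len)], c.toList, lcpN prev c.toList) := by
      simp only [stepA]
      rw [incdec_eq prev c.toList com_len h]
    rw [hstep]
    have hlcp : lcpN prev c.toList ≤ c.toList.length := by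
      have := lcpN_le prev c.toList; omega
    rw [ih c.toList (lcpN prev c.toList) _ hlcp]
    simp [gB]

theorem zipmap_eq (rest : List String) : ∀ (s0 : String),
    (((s0 :: rest).zip rest).map (fun pc =>
      String.ofList (pc.2.toList.drop (lcpLen pc.1.toList pc.2.toList 0)))) = gB s0.toList rest := by
  induction rest with
  | nil => intro s0; simp [gB]
  | cons c cs ih =>
    intro s0
    simp only [List.zip_cons_cons, List.map_cons, gB]
    rw [lcpLen_zero, ih c]

-- ===== VERDICT (by name: the statement is the Claim_ definition above) =====
theorem remove_common_prefixes_spec : Claim_equal_remove_common_prefixes := by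
  intro strings _
  unfold Spec_remove_common_prefixes
  cases strings with
  | nil => rfl
  | cons s0 rest =>
    simp only [remove_common_prefixes, remove_common_prefixes_alt, List.drop_succ_cons,
      List.drop_zero]
    rw [foldA_eq rest s0.toList 0 [] (Nat.zero_le _), zipmap_eq rest s0]
    simp
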